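-- pv_equiv track=rewrite | github.com/jvrsantacruz/velasco | bne/bne/spiders/catalogo.py | multidict
-- ===== SOURCE A (Python) =====
-- def multidict(items):
--     data = {}
--     for key, value in items:
--         if key in data:
--             data[key] += ';' + value
--         else:
--             data[key] = value
--     return data
-- ===== SOURCE B (Python) =====
-- def multidict(items):
--     # Phase 1: group values per key into lists (insertion order preserved).
--     groups = {}
--     for key, value in items:
--         groups.setdefault(key, []).append(value)
--     # Phase 2: join each group with ';'.
--     return {key: ';'.join(values) for key, values in groups.items()}
-- ===== Notes on version B (the rewrite author's own statement) =====
-- stated objective: idiomatic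
-- what changed: B groups values into per-key lists in one pass and then joins each list with ';' in a second pass, instead of A's in-place string concatenation behind an if/else membership branch.
import Mathlib
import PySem

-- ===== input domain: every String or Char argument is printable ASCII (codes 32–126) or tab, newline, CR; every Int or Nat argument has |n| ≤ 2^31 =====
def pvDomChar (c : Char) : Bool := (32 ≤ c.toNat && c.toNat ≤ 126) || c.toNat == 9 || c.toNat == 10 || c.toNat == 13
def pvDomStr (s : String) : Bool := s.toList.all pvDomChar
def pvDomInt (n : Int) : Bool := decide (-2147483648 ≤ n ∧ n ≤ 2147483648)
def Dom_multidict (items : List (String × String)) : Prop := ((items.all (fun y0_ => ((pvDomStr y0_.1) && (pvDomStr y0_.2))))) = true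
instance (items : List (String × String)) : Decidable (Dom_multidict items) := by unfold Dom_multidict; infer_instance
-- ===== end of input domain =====

-- B groups values into per-key lists in one pass, then joins each list with ';' in a
-- second pass, instead of A's in-place string concatenation behind an if/else branch (idiomatic).

-- ===== PORT A =====
-- state: data, a str→str dict; each item either extends the stored string or inserts a new one
def multidict (items : List (String × String)) : List (String × String) :=
  (items.foldl
    (fun data p =>
      if data.contains p.1 then
        data.insert p.1 (data.getD p.1 "" ++ (";" ++ p.2))   -- data[key] += ';' + value
      else
        data.insert p.1 p.2)                                  -- data[key] = value
    PySem.Dict.empty).items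

-- ===== PORT B =====
-- phase 1: groups, a str→list-of-str dict (setdefault(key, []).append(value) = modify);
-- phase 2: dict comprehension joining each group with ';'
def multidict_alt (items : List (String × String)) : List (String × String) :=
  let groups : PySem.Dict String (List String) :=
    items.foldl (fun g p => g.modify p.1 [] (fun vs => vs ++ [p.2])) PySem.Dict.empty
  groups.items.map (fun p => (p.1, PySem.Str.join ";" p.2))

-- ===== PRECONDITION & SPEC =====
def Spec_multidict (items : List (String × String)) (out : List (String × String)) : Prop := out = multidict_alt items
instance (items : List (String × String)) (out : List (String × String)) : Decidable (Spec_multidict items out) := by unfold Spec_multidict; infer_instance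

-- ===== CLAIM (what is proved, stated in full; the proofs are below) =====
def Claim_equal_multidict : Prop := ∀ (items : List (String × String)), Dom_multidict items → Spec_multidict items (multidict items)

-- ===== LEMMAS AND PROOFS =====

-- proof-only abbreviations for the two loops
def pvFoldA (l : List (String × String)) : PySem.Dict String String :=
  l.foldl
    (fun data p =>
      if data.contains p.1 then
        data.insert p.1 (data.getD p.1 "" ++ (";" ++ p.2))
      else
        data.insert p.1 p.2)
    PySem.Dict.empty

def pvFoldB (l : List (String × String)) : PySem.Dict String (List String) :=
  l.foldl (fun g p => g.modify p.1 [] (fun vs => vs ++ [p.2])) PySem.Dict.empty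

theorem pvFoldA_eq (l : List (String × String)) : pvFoldA l =
    l.foldl (fun data p => data.insert p.1
      (if data.contains p.1 then data.getD p.1 "" ++ (";" ++ p.2) else p.2)) PySem.Dict.empty := by
  unfold pvFoldA
  congr 1
  funext d p
  split <;> rfl

theorem pvCharsJoin_append (sep : List Char) (vs : List (List Char)) (v : List Char)
    (h : vs ≠ []) :
    PySem.Chars.join sep (vs ++ [v]) = PySem.Chars.join sep vs ++ sep ++ v := by
  induction vs with
  | nil => cases h rfl
  | cons a t ih =>
    cases t with
    | nil =>
      simp [PySem.Chars.join_cons_cons, PySem.Chars.join_singleton]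
    | cons b t' =>
      have hih := ih (by simp)
      simp only [List.cons_append, PySem.Chars.join_cons_cons] at hih ⊢
      rw [hih]
      simp [List.append_assoc]

theorem pvJoin_append (vs : List String) (v : String) (h : vs ≠ []) :
    PySem.Str.join ";" (vs ++ [v]) = PySem.Str.join ";" vs ++ (";" ++ v) := by
  rw [← String.toList_inj]
  simp only [PySem.Str.toList_join, List.map_append, List.map_cons, List.map_nil,
    String.toList_append]
  rw [pvCharsJoin_append _ _ _ (by simpa using h)]
  simp [List.append_assoc]

theorem pvKeysA (l : List (String × String)) :
    (pvFoldA l).keys = PySem.Set.update [] (l.map Prod.fst) := by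
  rw [pvFoldA_eq, PySem.Dict.keys_foldl_insert_key l Prod.fst]
  rfl

theorem pvKeysB (l : List (String × String)) :
    (pvFoldB l).keys = PySem.Set.update [] (l.map Prod.fst) := by
  unfold pvFoldB
  rw [PySem.Dict.keys_foldl_modify_key l Prod.fst [] (fun g p vs => vs ++ [p.2])]
  rfl

theorem pvNodupA (l : List (String × String)) : (pvFoldA l).keys.Nodup := by
  rw [pvFoldA_eq]
  exact PySem.Dict.nodup_keys_foldl_insert_key l Prod.fst _ _ (by simp)

theorem pvNodupB (l : List (String × String)) : (pvFoldB l).keys.Nodup := by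
  unfold pvFoldB
  exact PySem.Dict.nodup_keys_foldl_modify_key l Prod.fst [] (fun g p vs => vs ++ [p.2]) _ (by simp)

theorem pvFilter_ne_nil (l : List (String × String)) (k : String) :
    (l.filter (fun p => p.1 == k)) ≠ [] ↔ k ∈ l.map Prod.fst := by
  simp only [ne_eq, List.filter_eq_nil_iff, List.mem_map, not_forall]
  constructor
  · rintro ⟨p, hp, h⟩
    exact ⟨p, hp, by simpa using h⟩
  · rintro ⟨p, hp, rfl⟩
    exact ⟨p, hp, by simp⟩

theorem pvContainsA (l : List (String × String)) (k : String) :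
    (pvFoldA l).contains k = true ↔ (l.filter (fun p => p.1 == k)) ≠ [] := by
  rw [PySem.Dict.contains_iff_mem_keys, pvKeysA, PySem.Set.mem_update, pvFilter_ne_nil]
  simp [PySem.Set]

theorem pvValA (l : List (String × String)) (k : String)
    (h : (l.filter (fun p => p.1 == k)) ≠ []) :
    (pvFoldA l).getD k "" =
      PySem.Str.join ";" ((l.filter (fun p => p.1 == k)).map Prod.snd) := by
  induction l using List.reverseRecOn with
  | nil => simp at h
  | append_singleton l p ih =>
    have hstep : pvFoldA (l ++ [p]) =
        (if (pvFoldA l).contains p.1 then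
          (pvFoldA l).insert p.1 ((pvFoldA l).getD p.1 "" ++ (";" ++ p.2))
        else (pvFoldA l).insert p.1 p.2) := by
      unfold pvFoldA; rw [List.foldl_append]; rfl
    by_cases hk : p.1 = k
    · subst hk
      by_cases hc : (l.filter (fun q => q.1 == p.1)) = []
      · have hcontains : (pvFoldA l).contains p.1 = false := by
          rw [Bool.eq_false_iff]
          intro ht
          exact (pvContainsA l p.1).mp ht hc
        rw [hstep, if_neg (by simp [hcontains])]
        rw [List.filter_append, hc]
        simp [PySem.Dict.getD_insert_self, PySem.Str.join, PySem.Chars.join_singleton,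
          String.ofList]
      · have hcontains : (pvFoldA l).contains p.1 = true := (pvContainsA l p.1).mpr hc
        rw [hstep, if_pos hcontains]
        rw [List.filter_append]
        simp only [List.filter_cons, beq_self_eq_true, if_pos, List.filter_nil, List.map_append,
          List.map_cons, List.map_nil]
        rw [PySem.Dict.getD_insert_self, ih hc,
          pvJoin_append _ _ (by simpa using hc)]
    · have hfilter : ((l ++ [p]).filter (fun q => q.1 == k)) = l.filter (fun q => q.1 == k) := by
        rw [List.filter_append]
        simp [hk]
      rw [hfilter] at h ⊢
      rw [hstep]
      split <;> rw [PySem.Dict.getD_insert_of_ne _ _ _ (Ne.symm hk)] <;> exact ih h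

theorem pvAlt_eq (items : List (String × String)) :
    multidict_alt items = (pvFoldB items).items.map (fun p => (p.1, PySem.Str.join ";" p.2)) := rfl

theorem multidict_spec : Claim_equal_multidict := by
  intro items _
  show multidict items = multidict_alt items
  rw [pvAlt_eq]
  show (pvFoldA items).items = _
  rw [PySem.Dict.items_eq_map_keys _ (pvNodupA items) "",
      PySem.Dict.items_eq_map_keys _ (pvNodupB items) [], List.map_map]
  rw [pvKeysA, pvKeysB]
  apply List.map_congr_left
  intro k hk
  have hkm : k ∈ items.map Prod.fst := by
    rw [PySem.Set.mem_update] at hk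
    simpa [PySem.Set] using hk
  have hmem : (items.filter (fun p => p.1 == k)) ≠ [] := (pvFilter_ne_nil items k).mpr hkm
  simp only [Function.comp]
  congr 1
  rw [pvValA items k hmem]
  unfold pvFoldB
  rw [PySem.Dict.getD_foldl_modify_append]
  simp
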